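-- pv_equiv track=rewrite | github.com/Shahriyar-Khan27/ai_firewall | ai_firewall/engine/sql_analysis.py | primary_intent
-- ===== SOURCE A (Python) =====
-- _DESTRUCTIVE = {"DROP", "TRUNCATE", "DELETE"}
--
-- _WRITE = {"INSERT", "UPDATE", "MERGE", "REPLACE"}
--
-- _READ = {"SELECT", "WITH", "DESCRIBE", "SHOW", "EXPLAIN"}
--
-- _PRIVILEGE = {"GRANT", "REVOKE"}
--
-- def primary_intent(statements: tuple[str, ...]) -> str:
--     """Reduce a sequence of statement kinds to the most-severe intent.
--
--     Returns one of: DB_READ, DB_WRITE, DB_DESTRUCTIVE, DB_UNKNOWN.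
--     """
--     if not statements:
--         return "DB_UNKNOWN"
--     if any(s in _DESTRUCTIVE or s in _PRIVILEGE or s == "ALTER" or s == "CREATE" for s in statements):
--         # DDL + privilege ops + DELETE/TRUNCATE/DROP → destructive class
--         return "DB_DESTRUCTIVE"
--     if any(s in _WRITE for s in statements):
--         return "DB_WRITE"
--     if all(s in _READ for s in statements):
--         return "DB_READ"
--     return "DB_WRITE"
-- ===== SOURCE B (Python) =====
-- _SEVERE = {"DROP", "TRUNCATE", "DELETE", "GRANT", "REVOKE", "ALTER", "CREATE"}
--
-- _READONLY = {"SELECT", "WITH", "DESCRIBE", "SHOW", "EXPLAIN"}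
--
-- _NAMES = {3: "DB_DESTRUCTIVE", 2: "DB_WRITE", 1: "DB_READ"}
--
--
-- def _severity(s):
--     if s in _SEVERE:
--         return 3
--     if s in _READONLY:
--         return 1
--     return 2  # write kinds and anything unrecognized
--
--
-- def primary_intent(statements: tuple[str, ...]) -> str:
--     """Reduce a sequence of statement kinds to the most-severe intent."""
--     if not statements:
--         return "DB_UNKNOWN"
--     return _NAMES[max(_severity(s) for s in statements)]
-- ===== Notes on version B (the rewrite author's own statement) =====
-- stated objective: simpler
-- what changed: Replaced the three separate any/any/all scans (with a trailing default branch) by one numeric severity per statement kind and a single reduce-to-max pass mapped back to the intent name.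
import Mathlib
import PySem

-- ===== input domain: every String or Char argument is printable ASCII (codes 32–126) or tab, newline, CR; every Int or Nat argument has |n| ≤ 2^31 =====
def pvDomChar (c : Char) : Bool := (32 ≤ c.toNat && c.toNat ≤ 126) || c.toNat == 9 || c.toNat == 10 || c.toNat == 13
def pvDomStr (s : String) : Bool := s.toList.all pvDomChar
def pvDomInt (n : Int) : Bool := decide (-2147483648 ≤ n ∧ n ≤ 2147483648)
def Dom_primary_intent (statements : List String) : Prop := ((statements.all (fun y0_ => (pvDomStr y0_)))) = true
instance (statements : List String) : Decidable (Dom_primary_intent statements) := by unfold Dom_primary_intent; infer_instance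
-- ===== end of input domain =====

-- B replaces A's three any/any/all scans by one severity-per-kind table and a single reduce-to-max fold (objective: simpler).

-- ===== PORT A =====
def pvDESTRUCTIVE : PySem.Set String := PySem.Set.ofList ["DROP", "TRUNCATE", "DELETE"]
def pvWRITE : PySem.Set String := PySem.Set.ofList ["INSERT", "UPDATE", "MERGE", "REPLACE"]
def pvREAD : PySem.Set String := PySem.Set.ofList ["SELECT", "WITH", "DESCRIBE", "SHOW", "EXPLAIN"]
def pvPRIVILEGE : PySem.Set String := PySem.Set.ofList ["GRANT", "REVOKE"]

def primary_intent (statements : List String) : String :=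
  if statements = [] then "DB_UNKNOWN"
  else if statements.any (fun s => PySem.Set.contains pvDESTRUCTIVE s || PySem.Set.contains pvPRIVILEGE s || s == "ALTER" || s == "CREATE") then "DB_DESTRUCTIVE"
  else if statements.any (fun s => PySem.Set.contains pvWRITE s) then "DB_WRITE"
  else if statements.all (fun s => PySem.Set.contains pvREAD s) then "DB_READ"
  else "DB_WRITE"

-- ===== PORT B =====
def pvSEVERE : PySem.Set String := PySem.Set.ofList ["DROP", "TRUNCATE", "DELETE", "GRANT", "REVOKE", "ALTER", "CREATE"]
def pvREADONLY : PySem.Set String := PySem.Set.ofList ["SELECT", "WITH", "DESCRIBE", "SHOW", "EXPLAIN"]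
def pvNAMES : PySem.Dict Nat String := PySem.Dict.ofList [((3 : Nat), "DB_DESTRUCTIVE"), ((2 : Nat), "DB_WRITE"), ((1 : Nat), "DB_READ")]

def pvSeverity (s : String) : Nat :=
  if PySem.Set.contains pvSEVERE s then 3
  else if PySem.Set.contains pvREADONLY s then 1
  else 2

def primary_intent_alt (statements : List String) : String :=
  match statements with
  | [] => "DB_UNKNOWN"
  | s :: rest =>
      -- max over the generator = fold of Nat.max starting at the first element's severity
      PySem.Dict.getD pvNAMES (rest.foldl (fun m t => Nat.max m (pvSeverity t)) (pvSeverity s)) ""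

-- ===== PRECONDITION & SPEC =====
def Spec_primary_intent (statements : List String) (out : String) : Prop := out = primary_intent_alt statements
instance (statements : List String) (out : String) : Decidable (Spec_primary_intent statements out) := by unfold Spec_primary_intent; infer_instance

-- ===== CLAIM (what is proved, stated in full; the proofs are below) =====
def Claim_equal_primary_intent : Prop := ∀ (statements : List String), Dom_primary_intent statements → Spec_primary_intent statements (primary_intent statements)

-- ===== LEMMAS AND PROOFS =====

-- A's destructive test coincides with severity 3
theorem sev_eq_three_iff (s : String) :
    (PySem.Set.contains pvDESTRUCTIVE s || PySem.Set.contains pvPRIVILEGE s || s == "ALTER" || s == "CREATE") = true ↔ pvSeverity s = 3 := by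
  simp only [pvSeverity, pvDESTRUCTIVE, pvPRIVILEGE, pvSEVERE, pvREADONLY, PySem.Set.ofList,
    PySem.Set.contains, PySem.Set.empty]
  split_ifs with h1 h2 <;> simp_all <;> tauto

theorem sev_write (s : String) (h : PySem.Set.contains pvWRITE s = true) : pvSeverity s = 2 := by
  have hm : s = "INSERT" ∨ s = "UPDATE" ∨ s = "MERGE" ∨ s = "REPLACE" := by
    simpa [pvWRITE, PySem.Set.ofList, PySem.Set.contains, PySem.Set.empty] using h
  rcases hm with h | h | h | h <;> subst h <;> decide

theorem sev_read_iff (s : String) (hn3 : pvSeverity s ≠ 3) :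
    PySem.Set.contains pvREAD s = true ↔ pvSeverity s = 1 := by
  simp only [pvSeverity, pvREAD, pvREADONLY, PySem.Set.ofList, PySem.Set.contains,
    PySem.Set.empty] at *
  split_ifs at * <;> simp_all

theorem sev_range (s : String) : pvSeverity s = 1 ∨ pvSeverity s = 2 ∨ pvSeverity s = 3 := by
  unfold pvSeverity; split_ifs <;> simp

theorem sev_le_three (s : String) : pvSeverity s ≤ 3 := by
  rcases sev_range s with h | h | h <;> omega

-- foldl-max facts
theorem le_foldl_max (l : List String) (a : Nat) :
    a ≤ l.foldl (fun m t => Nat.max m (pvSeverity t)) a := by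
  induction l generalizing a with
  | nil => simp
  | cons x xs ih => exact le_trans (Nat.le_max_left _ _) (ih _)

theorem mem_le_foldl_max (l : List String) (t : String) :
    ∀ a : Nat, t ∈ l → pvSeverity t ≤ l.foldl (fun m t => Nat.max m (pvSeverity t)) a := by
  induction l with
  | nil => intro a ht; cases ht
  | cons x xs ih =>
    intro a ht
    rcases List.mem_cons.mp ht with h | h
    · subst h; exact le_trans (Nat.le_max_right _ _) (le_foldl_max _ _)
    · exact ih _ h

theorem foldl_max_attained (l : List String) :
    ∀ a : Nat, l.foldl (fun m t => Nat.max m (pvSeverity t)) a = a ∨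
      ∃ t ∈ l, l.foldl (fun m t => Nat.max m (pvSeverity t)) a = pvSeverity t := by
  induction l with
  | nil => intro a; left; rfl
  | cons x xs ih =>
    intro a
    rcases ih (Nat.max a (pvSeverity x)) with h | ⟨t, ht, h⟩
    · by_cases hc : a ≤ pvSeverity x
      · right
        refine ⟨x, List.mem_cons_self, ?_⟩
        simp only [List.foldl_cons]
        rw [h]; exact Nat.max_eq_right hc
      · left
        simp only [List.foldl_cons]
        rw [h]; exact Nat.max_eq_left (Nat.le_of_not_le hc)
    · right; exact ⟨t, List.mem_cons_of_mem _ ht, h⟩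

-- the maximum severity of a nonempty list is the severity of one of its members
theorem foldl_max_mem (s : String) (rest : List String) :
    ∃ t ∈ s :: rest, rest.foldl (fun m t => Nat.max m (pvSeverity t)) (pvSeverity s) = pvSeverity t := by
  rcases foldl_max_attained rest (pvSeverity s) with h | ⟨t, ht, h⟩
  · exact ⟨s, List.mem_cons_self, h⟩
  · exact ⟨t, List.mem_cons_of_mem _ ht, h⟩

-- ===== VERDICT (by name: the statement is the Claim_ definition above) =====
theorem primary_intent_spec : Claim_equal_primary_intent := by
  intro statements _
  unfold Spec_primary_intent
  match statements with
  | [] => rfl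
  | s :: rest =>
    simp only [primary_intent, primary_intent_alt, reduceCtorEq, if_false]
    set M := rest.foldl (fun m t => Nat.max m (pvSeverity t)) (pvSeverity s) with hM
    have hmemle : ∀ t ∈ s :: rest, pvSeverity t ≤ M := by
      intro t ht
      rcases List.mem_cons.mp ht with h | h
      · subst h; exact le_foldl_max _ _
      · exact mem_le_foldl_max _ _ _ h
    obtain ⟨u, hu, huM⟩ := foldl_max_mem s rest
    rw [← hM] at huM
    by_cases hd : (s :: rest).any (fun s => PySem.Set.contains pvDESTRUCTIVE s || PySem.Set.contains pvPRIVILEGE s || s == "ALTER" || s == "CREATE") = true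
    · -- destructive: some member has severity 3, so M = 3
      obtain ⟨t, ht, htp⟩ := List.any_eq_true.mp hd
      have h3 : pvSeverity t = 3 := (sev_eq_three_iff t).mp htp
      have hM3 : M = 3 := le_antisymm (huM ▸ sev_le_three u) (h3 ▸ hmemle t ht)
      rw [if_pos hd, hM3]; simp [pvNAMES, PySem.Dict.ofList, PySem.Dict.getD, PySem.Dict.get?, PySem.Dict.insert, PySem.Dict.empty, PySem.Dict.contains, PySem.Dict.update]
    · have hno3 : ∀ t ∈ s :: rest, pvSeverity t ≠ 3 := by
        intro t ht h3
        exact hd (List.any_eq_true.mpr ⟨t, ht, (sev_eq_three_iff t).mpr h3⟩)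
      have hMle2 : M ≤ 2 := by
        have := hno3 u hu
        rcases sev_range u with h | h | h <;> omega
      rw [if_neg hd]
      by_cases hw : (s :: rest).any (fun s => PySem.Set.contains pvWRITE s) = true
      · obtain ⟨t, ht, htp⟩ := List.any_eq_true.mp hw
        have h2 : pvSeverity t = 2 := sev_write t htp
        have hM2 : M = 2 := le_antisymm hMle2 (h2 ▸ hmemle t ht)
        rw [if_pos hw, hM2]; simp [pvNAMES, PySem.Dict.ofList, PySem.Dict.getD, PySem.Dict.get?, PySem.Dict.insert, PySem.Dict.empty, PySem.Dict.contains, PySem.Dict.update]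
      · rw [if_neg hw]
        by_cases hr : (s :: rest).all (fun s => PySem.Set.contains pvREAD s) = true
        · -- all read: every severity is 1, so M = 1
          have h1 : pvSeverity u = 1 :=
            (sev_read_iff u (hno3 u hu)).mp (List.all_eq_true.mp hr u hu)
          rw [if_pos hr, huM, h1]; simp [pvNAMES, PySem.Dict.ofList, PySem.Dict.getD, PySem.Dict.get?, PySem.Dict.insert, PySem.Dict.empty, PySem.Dict.contains, PySem.Dict.update]
        · -- some member is neither destructive, write, nor read: its severity is 2
          have hex : ∃ t ∈ s :: rest, ¬ PySem.Set.contains pvREAD t = true := by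
            rw [List.all_eq_true] at hr; push Not at hr; exact hr
          obtain ⟨t, ht, htp⟩ := hex
          have h2 : pvSeverity t = 2 := by
            have hn3 := hno3 t ht
            have h1 : pvSeverity t ≠ 1 := fun h1 =>
              htp ((sev_read_iff t hn3).mpr h1)
            rcases sev_range t with h | h | h <;> omega
          have hM2 : M = 2 := le_antisymm hMle2 (h2 ▸ hmemle t ht)
          rw [if_neg hr, hM2]; simp [pvNAMES, PySem.Dict.ofList, PySem.Dict.getD, PySem.Dict.get?, PySem.Dict.insert, PySem.Dict.empty, PySem.Dict.contains, PySem.Dict.update]
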